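-- pv_equiv track=rewrite | github.com/usnistgov/Magnicon-Offline-Analyzer | spectral.py | get_segment_starts
-- ===== SOURCE A (Python) =====
-- def get_segment_starts(N,L,D):
--     """
--         This function returns the startindices for the overlapping segements to
--         calculate the PSD. The list looks like [0,ix1,ix2,ix3,..]. The length
--         of the original data stream is N. The length of one segment is L and D
--         is the overlap. The  segments run from 0..L-1,ix1..ix1+L-1,....,ixK..
--         ixK+L-1, with ix1=D,ix2=2*D,ix3=3*D...
--         Note this is in python notation data[ix1:ix1+L]
--     """
--     a=[0]
--     ss=0
--     if D==0: return a
--     while ss+D+L<=N: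
--         ss=ss+D
--         a.append(ss)
--     return a
-- ===== SOURCE B (Python) =====
-- def get_segment_starts(N, L, D):
--     if D <= 0:
--         return [0]
--     K = (N - L) // D
--     if K < 0:
--         K = 0
--     return [i * D for i in range(K + 1)]
-- ===== Notes on version B (the rewrite author's own statement) =====
-- stated objective: simpler
-- what changed: Replaces the append-while-loop with a closed-form segment count K = max(0, (N-L)//D) and builds the list directly as [i*D for i in range(K+1)].
import Mathlib
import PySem

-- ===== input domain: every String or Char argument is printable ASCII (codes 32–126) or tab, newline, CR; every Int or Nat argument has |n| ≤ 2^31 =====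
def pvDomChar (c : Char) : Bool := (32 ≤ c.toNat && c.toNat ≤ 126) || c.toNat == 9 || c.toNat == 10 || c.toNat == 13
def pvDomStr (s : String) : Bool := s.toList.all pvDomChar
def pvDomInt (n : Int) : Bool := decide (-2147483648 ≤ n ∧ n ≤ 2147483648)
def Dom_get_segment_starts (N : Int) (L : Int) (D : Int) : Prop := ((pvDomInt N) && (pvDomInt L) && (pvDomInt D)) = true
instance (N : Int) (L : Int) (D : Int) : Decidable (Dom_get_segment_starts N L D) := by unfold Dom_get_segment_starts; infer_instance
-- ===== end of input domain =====

-- B replaces A's append-while-loop with a closed-form segment count and a direct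
-- range comprehension (objective: simpler).

-- ===== PORT A =====
-- A's while loop, step for step; fuel bounds the iterations (the loop body runs at
-- most (N-L).toNat times when it terminates, see pvLoopA_fuel arguments below).
def pvLoopA (fuel : Nat) (N : Int) (L : Int) (D : Int) (ss : Int) (a : List Int) : List Int :=
  match fuel with
  | 0 => a
  | fuel' + 1 =>
      if ss + D + L ≤ N then pvLoopA fuel' N L D (ss + D) (a ++ [ss + D]) else a

def get_segment_starts (N : Int) (L : Int) (D : Int) : List Int :=
  if D = 0 then [0]
  else pvLoopA ((N - L).toNat + 1) N L D 0 [0]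

-- ===== PORT B =====
def get_segment_starts_alt (N : Int) (L : Int) (D : Int) : List Int :=
  if D ≤ 0 then [0]
  else
    let K := PySem.Int.floordiv (N - L) D
    let K := if K < 0 then 0 else K
    (PySem.List.pyRange 0 (K + 1) 1).map (fun i => i * D)

-- ===== PRECONDITION & SPEC =====
-- Pre_ excludes exactly the inputs where A's while loop never terminates
-- (D < 0 with D + L ≤ N); A returns on every other input.
def Pre_get_segment_starts (N : Int) (L : Int) (D : Int) : Prop := 0 ≤ D ∨ N < D + L
instance (N : Int) (L : Int) (D : Int) : Decidable (Pre_get_segment_starts N L D) := by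
  unfold Pre_get_segment_starts; infer_instance

def pvWitness_get_segment_starts : Int × Int × Int := (10, 4, 2)

def Spec_get_segment_starts (N : Int) (L : Int) (D : Int) (out : List Int) : Prop :=
  out = get_segment_starts_alt N L D
instance (N : Int) (L : Int) (D : Int) (out : List Int) : Decidable (Spec_get_segment_starts N L D out) := by
  unfold Spec_get_segment_starts; infer_instance

-- ===== CLAIM (what is proved, stated in full; the proofs are below) =====
def Claim_equal_get_segment_starts : Prop :=
  ∀ (N : Int) (L : Int) (D : Int), Dom_get_segment_starts N L D →
    Pre_get_segment_starts N L D →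
    Spec_get_segment_starts N L D (get_segment_starts N L D)

-- ===== LEMMAS AND PROOFS =====

-- Loop invariant: starting at ss = j*D with the first j+1 starts accumulated,
-- the loop produces all K+1 starts, provided the bracket characterises the
-- loop condition and the fuel covers the remaining K - j iterations.
theorem pvLoopA_inv (N L D K : Int)
    (hbr : ∀ j' : Int, 0 ≤ j' → ((j' + 1) * D ≤ N - L ↔ j' < K)) :
    ∀ (fuel : Nat) (j : Int), 0 ≤ j → j ≤ K → (K - j).toNat < fuel →
      pvLoopA fuel N L D (j * D) ((PySem.List.pyRange 0 (j + 1) 1).map (fun i => i * D))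
        = (PySem.List.pyRange 0 (K + 1) 1).map (fun i => i * D) := by
  intro fuel
  induction fuel with
  | zero => intro j _ _ h; omega
  | succ fuel' ih =>
      intro j hj hjK hfuel
      unfold pvLoopA
      by_cases hcond : j * D + D + L ≤ N
      · have hlt : j < K := by
          have := (hbr j hj).mp (by linarith)
          exact this
        simp only [if_pos hcond]
        have hstep : j * D + D = (j + 1) * D := by ring
        have hr : PySem.List.pyRange 0 (j + 1 + 1) 1
            = PySem.List.pyRange 0 (j + 1) 1 ++ [j + 1] :=
          PySem.List.pyRange_one_succ_right (a := 0) (b := j + 1) (by omega)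
        have happ : (PySem.List.pyRange 0 (j + 1) 1).map (fun i => i * D) ++ [j * D + D]
            = (PySem.List.pyRange 0 ((j + 1) + 1) 1).map (fun i => i * D) := by
          rw [hr, List.map_append]; simp [hstep]
        rw [happ, hstep]
        exact ih (j + 1) (by omega) (by omega) (by omega)
      · have hge : ¬ j < K := fun h => hcond (by have := (hbr j hj).mpr h; linarith)
        have hjK' : j = K := by omega
        rw [if_neg hcond, hjK']

-- ===== VERDICT (by name: the statement is the Claim_ definition above) =====
theorem get_segment_starts_spec : Claim_equal_get_segment_starts := by
  intro N L D _ hpre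
  unfold Spec_get_segment_starts get_segment_starts get_segment_starts_alt
  by_cases hD0 : D = 0
  · simp [hD0]
  · by_cases hDpos : 0 < D
    · have hDle : ¬ D ≤ 0 := by omega
      simp only [if_neg hD0, if_neg hDle]
      set F := PySem.Int.floordiv (N - L) D with hF
      have hbr : ∀ j' : Int, 0 ≤ j' → ((j' + 1) * D ≤ N - L ↔ j' < F) := by
        intro j' _
        rw [← PySem.Int.le_floordiv_iff_mul_le (a := N - L) (b := D) (q := j' + 1) hDpos, ← hF]
        omega
      set K := if F < 0 then (0 : Int) else F with hK
      have hKnn : 0 ≤ K := by rw [hK]; split <;> omega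
      have hbrK : ∀ j' : Int, 0 ≤ j' → ((j' + 1) * D ≤ N - L ↔ j' < K) := by
        intro j' hj'
        rw [hbr j' hj', hK]; split <;> omega
      -- fuel bound: K ≤ (N - L).toNat
      have hFD : F * D ≤ N - L :=
        (PySem.Int.le_floordiv_iff_mul_le (a := N - L) (b := D) (q := F) hDpos).mp le_rfl
      have hfuel : (K - 0).toNat < (N - L).toNat + 1 := by
        by_cases h : F ≤ 0
        · have : K = 0 ∨ K = F := by rw [hK]; split <;> simp
          omega
        · have hKF : K = F := by rw [hK]; omega
          have : F ≤ F * D := le_mul_of_one_le_right (by omega) (by omega)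
          omega
      have := pvLoopA_inv N L D K hbrK ((N - L).toNat + 1) 0
        le_rfl hKnn hfuel
      rw [show (PySem.List.pyRange 0 (0 + 1) 1).map (fun i : Int => i * D) = [0] from by
        rw [PySem.List.pyRange_one_singleton]; simp, zero_mul] at this
      exact this
    · -- D < 0: Pre_ gives N < D + L, so the loop body never runs
      have hDneg : D < 0 := by omega
      have hNL : N < D + L := by
        rcases hpre with h | h
        · omega
        · exact h
      have hDle : D ≤ 0 := by omega
      simp only [if_neg hD0, if_pos hDle]
      show pvLoopA ((N - L).toNat + 1) N L D 0 [0] = [0]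
      unfold pvLoopA
      rw [if_neg (show ¬ (0 + D + L ≤ N) by omega)]
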